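-- pv_equiv track=rewrite | github.com/maenwi/Coding-Test-Problem-Solve | 프로그래머스/1/42576. 완주하지 못한 선수/완주하지 못한 선수.py | handle_dup
-- ===== SOURCE A (Python) =====
-- def handle_dup(people):
--     appear = {}
--     dup_handled_people = set()
--     for person in people:
--         try:
--             appear[person] += 1
--         except:
--             appear[person] = 1
--         dup_handled_people.add(f"{person}_{appear[person]}")
--
--     return dup_handled_people
-- ===== SOURCE B (Python) =====
-- def handle_dup(people):
--     # Phase 1: group, per name, the list of positions at which it occurs.
--     positions = {}
--     for i, name in enumerate(people):
--         positions.setdefault(name, []).append(i)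
--     # Phase 2: scatter "name_k" back into the slot of the k-th occurrence.
--     tags = [""] * len(people)
--     for name, idxs in positions.items():
--         for k, i in enumerate(idxs, 1):
--             tags[i] = f"{name}_{k}"
--     return set(tags)
-- ===== Notes on version B (the rewrite author's own statement) =====
-- stated objective: alternative
-- what changed: Replaced A's single pass with a running per-name counter by a two-phase group-and-scatter algorithm: first group the occurrence positions of each name into a dict of index lists, then for each distinct name enumerate its positions 1..k and scatter the tag name_k into a preallocated slot array, finally turn that array into a set.
import Mathlib
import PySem

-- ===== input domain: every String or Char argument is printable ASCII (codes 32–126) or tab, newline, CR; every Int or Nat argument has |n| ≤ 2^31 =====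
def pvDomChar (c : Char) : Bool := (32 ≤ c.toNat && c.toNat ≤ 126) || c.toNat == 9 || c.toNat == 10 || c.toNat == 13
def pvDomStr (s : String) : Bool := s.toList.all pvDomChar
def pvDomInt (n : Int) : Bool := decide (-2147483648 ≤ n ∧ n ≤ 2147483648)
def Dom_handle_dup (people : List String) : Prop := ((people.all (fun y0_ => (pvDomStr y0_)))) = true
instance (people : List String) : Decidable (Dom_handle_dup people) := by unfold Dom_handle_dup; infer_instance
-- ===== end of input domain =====

-- B replaces A's single pass with a running per-name counter by a two-phase group-and-scatter:
-- group each name's occurrence positions, then scatter "name_k" into a preallocated slot array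
-- and build the set from it ("alternative": different algorithm, same asymptotic cost).


-- ===== PORT A =====
-- the body of A's for-loop: try appear[person] += 1 / except: appear[person] = 1;
-- then add f"{person}_{appear[person]}" to the set
def handleDupStep (st : PySem.Dict String Int × PySem.Set String) (person : String) :
    PySem.Dict String Int × PySem.Set String :=
  let appear :=
    match st.1.get? person with
    | some v => st.1.insert person (v + 1)        -- appear[person] += 1
    | none   => st.1.insert person 1              -- except: appear[person] = 1
  (appear, PySem.Set.add st.2 (person ++ "_" ++ PySem.Int.toStr (appear.getD person 0)))

def handle_dup (people : List String) : List String :=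
  (people.foldl handleDupStep (PySem.Dict.empty, PySem.Set.empty)).2

-- ===== PORT B =====
-- phase 1: positions.setdefault(name, []).append(i) mutates the list in place, so the key keeps
-- its dict position and the index list grows at the end: exactly d.insert name (d.getD name [] ++ [i])
-- (PySem.Dict.insert overwrites in place).
def buildPositions (people : List String) : PySem.Dict String (List Int) :=
  (PySem.List.enumerate people 0).foldl
    (fun d ip => d.insert ip.2 (d.getD ip.2 [] ++ [ip.1])) PySem.Dict.empty

-- phase 2: tags[i] = f"{name}_{k}"; every i is a valid nonnegative index, pySetD is exact there
def scatterTags (people : List String) : List String :=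
  (buildPositions people).items.foldl
    (fun tags nis =>
      (PySem.List.enumerate nis.2 1).foldl
        (fun tags ki => PySem.List.pySetD tags ki.2 (nis.1 ++ "_" ++ PySem.Int.toStr ki.1))
        tags)
    (List.replicate people.length "")

def handle_dup_alt (people : List String) : List String :=
  PySem.Set.ofList (scatterTags people)

-- ===== PRECONDITION & SPEC =====
def Spec_handle_dup (people : List String) (out : List String) : Prop := out = handle_dup_alt people
instance (people : List String) (out : List String) : Decidable (Spec_handle_dup people out) := by unfold Spec_handle_dup; infer_instance

-- ===== CLAIM (what is proved, stated in full; the proofs are below) =====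
def Claim_equal_handle_dup : Prop := ∀ (people : List String), Dom_handle_dup people → Spec_handle_dup people (handle_dup people)

-- ===== LEMMAS AND PROOFS =====

-- the common reference list: the tag of each element, in input order, the tag of position j being
-- element_(1 + number of occurrences of that element before j); pre is the already-seen prefix
def tagsFrom (pre l : List String) : List String :=
  match l with
  | [] => []
  | x :: xs => (x ++ "_" ++ PySem.Int.toStr ((pre.count x : Int) + 1)) :: tagsFrom (pre ++ [x]) xs

-- the (0-based, offset by s) positions of name in l
def posOf (l : List String) (s : Int) (name : String) : List Int :=
  ((PySem.List.enumerate l s).filter (fun ip => ip.2 == name)).map Prod.fst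

-- sequential list assignments
def writeAll (ws : List (Int × String)) (t : List String) : List String :=
  ws.foldl (fun t w => PySem.List.pySetD t w.1 w.2) t

-- ---- A side ----

lemma handleDupStep_eq (d : PySem.Dict String Int) (s : PySem.Set String) (x : String) :
    handleDupStep (d, s) x =
      (d.insert x (d.getD x 0 + 1),
       PySem.Set.add s (x ++ "_" ++ PySem.Int.toStr (d.getD x 0 + 1))) := by
  unfold handleDupStep
  cases h : d.get? x with
  | none => simp [PySem.Dict.getD, h]
  | some v => simp [PySem.Dict.getD, h]

lemma foldl_handleDupStep (l : List String) :
    ∀ (pre : List String) (d : PySem.Dict String Int) (s : PySem.Set String),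
      (∀ p, d.getD p 0 = (pre.count p : Int)) →
      (l.foldl handleDupStep (d, s)).2 = (tagsFrom pre l).foldl PySem.Set.add s := by
  induction l with
  | nil => intro pre d s _; rfl
  | cons x xs ih =>
      intro pre d s hd
      simp only [List.foldl_cons, handleDupStep_eq, tagsFrom, hd x]
      refine ih (pre ++ [x]) _ _ ?_
      intro p
      rw [PySem.Dict.getD_insert]
      by_cases hpx : p = x
      · subst hpx; simp [List.count_append]
      · simp [hpx, hd p, List.count_append, Ne.symm hpx]

lemma handle_dup_eq_tags (people : List String) :
    handle_dup people = PySem.Set.ofList (tagsFrom [] people) := by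
  unfold handle_dup
  rw [foldl_handleDupStep people [] _ _ (by intro p; rfl)]
  rfl

-- ---- reference list, pointwise ----

lemma tagsFrom_length (l : List String) : ∀ pre, (tagsFrom pre l).length = l.length := by
  induction l with
  | nil => intro pre; rfl
  | cons x xs ih => intro pre; simp [tagsFrom, ih]

lemma tagsFrom_getElem (l : List String) :
    ∀ (pre : List String) (j : Nat) (hj : j < l.length),
      (tagsFrom pre l)[j]'(by rw [tagsFrom_length]; exact hj) =
        l[j] ++ "_" ++ PySem.Int.toStr (((pre ++ l.take j).count l[j] : Int) + 1) := by
  induction l with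
  | nil => intro pre j hj; simp at hj
  | cons x xs ih =>
      intro pre j hj
      match j with
      | 0 => simp [tagsFrom]
      | k + 1 =>
          have hk : k < xs.length := by simpa using hj
          simp only [tagsFrom, List.getElem_cons_succ, List.take_succ_cons]
          rw [ih (pre ++ [x]) k hk]
          simp

-- ---- B side ----

lemma posOf_cons (x : String) (xs : List String) (s : Int) (name : String) :
    posOf (x :: xs) s name =
      (if x = name then [s] else []) ++ posOf xs (s + 1) name := by
  unfold posOf
  rw [PySem.List.enumerate_cons]
  by_cases h : x = name <;> simp [h]

lemma mem_posOf {l : List String} {s : Int} {name : String} {x : Int} :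
    x ∈ posOf l s name ↔ ∃ (k : Nat), ∃ h : k < l.length, x = s + k ∧ l[k] = name := by
  unfold posOf
  simp only [List.mem_map, List.mem_filter]
  constructor
  · rintro ⟨ip, ⟨hmem, heq⟩, rfl⟩
    rcases (PySem.List.mem_enumerate_iff _ _ _).1 hmem with ⟨k, hk, rfl⟩
    exact ⟨k, hk, rfl, by simpa using heq⟩
  · rintro ⟨k, hk, rfl, hname⟩
    refine ⟨(s + k, l[k]), ⟨?_, by simpa using hname⟩, rfl⟩
    exact (PySem.List.mem_enumerate_iff _ _ _).2 ⟨k, hk, rfl⟩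

lemma posOf_pairwise (l : List String) (s : Int) (name : String) :
    (posOf l s name).Pairwise (· < ·) := by
  unfold posOf
  rw [List.pairwise_map]
  exact ((PySem.List.pairwise_lt_enumerate l s).sublist List.filter_sublist)

lemma posOf_nodup (l : List String) (s : Int) (name : String) :
    (posOf l s name).Nodup :=
  (posOf_pairwise l s name).imp Int.ne_of_lt

lemma posOf_getElem? (l : List String) :
    ∀ (s : Int) (j : Nat) (hj : j < l.length),
      (posOf l s l[j])[(l.take j).count l[j]]? = some (s + j) := by
  induction l with
  | nil => intro s j hj; simp at hj
  | cons x xs ih =>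
      intro s j hj
      match j with
      | 0 =>
          simp only [List.getElem_cons_zero, List.take_zero, List.count_nil]
          rw [posOf_cons]
          simp
      | k + 1 =>
          have hk : k < xs.length := by simpa using hj
          simp only [List.getElem_cons_succ, List.take_succ_cons]
          rw [posOf_cons]
          have hih := ih (s + 1) k hk
          by_cases hx : x = xs[k]
          · rw [← hx] at hih ⊢
            rw [List.count_cons_self, if_pos rfl, List.singleton_append,
                List.getElem?_cons_succ, hih]
            congr 1
            push_cast
            ring
          · rw [List.count_cons_of_ne hx, if_neg hx, List.nil_append, hih]
            congr 1
            push_cast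
            ring

lemma getD_buildPositions_aux (l : List String) :
    ∀ (s : Int) (d : PySem.Dict String (List Int)) (name : String),
      ((PySem.List.enumerate l s).foldl
        (fun d ip => d.insert ip.2 (d.getD ip.2 [] ++ [ip.1])) d).getD name []
      = d.getD name [] ++ posOf l s name := by
  induction l with
  | nil => intro s d name; simp [posOf, PySem.List.enumerate_nil]
  | cons x xs ih =>
      intro s d name
      rw [PySem.List.enumerate_cons]
      simp only [List.foldl_cons]
      rw [ih, posOf_cons]
      by_cases h : x = name
      · subst h; rw [PySem.Dict.getD_insert_self]; simp
      · rw [PySem.Dict.getD_insert_of_ne _ _ _ (Ne.symm h)]; simp [h]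

lemma getD_buildPositions (people : List String) (name : String) :
    (buildPositions people).getD name [] = posOf people 0 name := by
  unfold buildPositions
  rw [getD_buildPositions_aux]
  rfl

lemma keys_buildPositions (people : List String) :
    (buildPositions people).keys = PySem.Set.ofList people := by
  unfold buildPositions
  rw [PySem.Dict.keys_foldl_insert_key]
  rw [PySem.List.map_snd_enumerate]
  rfl

lemma items_buildPositions (people : List String) :
    (buildPositions people).items =
      (PySem.Set.ofList people).map (fun name => (name, posOf people 0 name)) := by
  rw [PySem.Dict.items_eq_map_keys _ (by rw [keys_buildPositions]; exact PySem.Set.nodup_ofList people) []]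
  rw [keys_buildPositions]
  exact List.map_congr_left (fun name _ => by rw [getD_buildPositions])

-- the nested scatter loop, flattened into one sequence of writes
lemma scatterTags_eq_writeAll (people : List String) :
    scatterTags people =
      writeAll
        ((buildPositions people).items.flatMap (fun nis =>
          (PySem.List.enumerate nis.2 1).map
            (fun ki => (ki.2, nis.1 ++ "_" ++ PySem.Int.toStr ki.1))))
        (List.replicate people.length "") := by
  unfold scatterTags writeAll
  generalize (buildPositions people).items = items
  generalize (List.replicate people.length "" : List String) = t
  induction items generalizing t with
  | nil => rfl
  | cons nis rest ih =>
      simp only [List.foldl_cons, List.flatMap_cons, List.foldl_append, List.foldl_map]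
      exact ih _

lemma length_writeAll (ws : List (Int × String)) :
    ∀ t : List String, (writeAll ws t).length = t.length := by
  induction ws with
  | nil => intro t; rfl
  | cons w rest ih =>
      intro t
      unfold writeAll
      simp only [List.foldl_cons]
      rw [show (List.foldl (fun t w => PySem.List.pySetD t w.1 w.2) (PySem.List.pySetD t w.1 w.2) rest) = writeAll rest (PySem.List.pySetD t w.1 w.2) from rfl]
      rw [ih, PySem.List.length_pySetD]

lemma writeAll_getElem?_of_not_mem (ws : List (Int × String)) :
    ∀ (t : List String) (j : Nat),
      (∀ w ∈ ws, 0 ≤ w.1) →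
      (∀ w ∈ ws, w.1 ≠ (j : Int)) →
      (writeAll ws t)[j]? = t[j]? := by
  induction ws with
  | nil => intro t j _ _; rfl
  | cons w rest ih =>
      intro t j hpos hne
      unfold writeAll
      simp only [List.foldl_cons]
      rw [show (List.foldl (fun t w => PySem.List.pySetD t w.1 w.2) (PySem.List.pySetD t w.1 w.2) rest) = writeAll rest (PySem.List.pySetD t w.1 w.2) from rfl]
      rw [ih _ j (fun w hw => hpos w (List.mem_cons_of_mem _ hw))
            (fun w hw => hne w (List.mem_cons_of_mem _ hw))]
      rw [PySem.List.pySetD_of_nonneg _ _ (hpos w List.mem_cons_self)]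
      rw [List.getElem?_set_ne]
      intro hc
      have := hpos w List.mem_cons_self
      exact hne w List.mem_cons_self (by omega)

lemma writeAll_getElem?_of_mem (ws : List (Int × String)) :
    ∀ (t : List String) (j : Nat) (v : String),
      (∀ w ∈ ws, 0 ≤ w.1) →
      (ws.map Prod.fst).Nodup → ((j : Int), v) ∈ ws → j < t.length →
      (writeAll ws t)[j]? = some v := by
  induction ws with
  | nil => intro t j v _ _ hmem _; simp at hmem
  | cons w rest ih =>
      intro t j v hpos hnd hmem hj
      unfold writeAll
      simp only [List.foldl_cons]
      rw [show (List.foldl (fun t w => PySem.List.pySetD t w.1 w.2) (PySem.List.pySetD t w.1 w.2) rest) = writeAll rest (PySem.List.pySetD t w.1 w.2) from rfl]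
      simp only [List.map_cons, List.nodup_cons] at hnd
      rcases List.mem_cons.1 hmem with heq | htail
      · -- this write is (j, v); no later write touches j
        rw [writeAll_getElem?_of_not_mem _ _ j
              (fun w hw => hpos w (List.mem_cons_of_mem _ hw)) ?_]
        · rw [← heq]
          rw [PySem.List.pySetD_of_nonneg _ _ (by simp)]
          simp only [Int.toNat_natCast]
          rw [List.getElem?_set_self (by simpa using hj)]
        · intro w' hw' hc
          apply hnd.1
          have hw1 : w.1 = (j : Int) := by rw [← heq]
          rw [hw1, ← hc]
          exact List.mem_map_of_mem hw'
      · -- (j, v) is written later; this write is at a different index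
        have hne : w.1 ≠ (j : Int) := by
          intro hc
          exact hnd.1 (hc ▸ (List.mem_map_of_mem htail : ((j:Int), v).1 ∈ rest.map Prod.fst))
        refine ih _ j v (fun w hw => hpos w (List.mem_cons_of_mem _ hw)) hnd.2 htail ?_
        rw [PySem.List.length_pySetD]; exact hj

-- every write index is some position of its name; distinct names have disjoint position lists
lemma writes_fst (people : List String) :
    ((buildPositions people).items.flatMap (fun nis =>
        (PySem.List.enumerate nis.2 1).map
          (fun ki => (ki.2, nis.1 ++ "_" ++ PySem.Int.toStr ki.1)))).map Prod.fst
      = (PySem.Set.ofList people).flatMap (fun name => posOf people 0 name) := by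
  rw [items_buildPositions, List.map_flatMap, List.flatMap_map]
  refine List.flatMap_congr (fun name _ => ?_)
  rw [List.map_map]
  exact PySem.List.map_snd_enumerate _ _

lemma writes_fst_nodup (people : List String) :
    ((PySem.Set.ofList people).flatMap (fun name => posOf people 0 name)).Nodup := by
  rw [List.nodup_flatMap]
  refine ⟨fun name _ => posOf_nodup people 0 name, ?_⟩
  refine List.Pairwise.imp_of_mem ?_ (PySem.Set.nodup_ofList people)
  intro a b _ _ hab
  simp only [Function.onFun]
  rw [List.disjoint_left]
  intro x hxa hxb
  rcases mem_posOf.1 hxa with ⟨k, hk, rfl, hka⟩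
  rcases mem_posOf.1 hxb with ⟨k', hk', heq, hkb⟩
  have hkk : k = k' := by omega
  subst hkk
  exact hab (hka.symm.trans hkb)

-- the scatter result is exactly the reference tag list
lemma scatterTags_eq_tagsFrom (people : List String) :
    scatterTags people = tagsFrom [] people := by
  rw [scatterTags_eq_writeAll]
  apply List.ext_getElem?
  intro j
  by_cases hj : j < people.length
  · -- position j receives exactly the tag of people[j]
    have hq := posOf_getElem? people 0 j hj
    set name := people[j] with hname
    set r := (people.take j).count name with hrdef
    rw [show ((0 : Int) + j) = (j : Int) by ring] at hq
    obtain ⟨hr, hval⟩ := List.getElem?_eq_some_iff.1 hq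
    have hpair : ((j : Int), name ++ "_" ++ PySem.Int.toStr (1 + (r : Int))) ∈
        (buildPositions people).items.flatMap (fun nis =>
          (PySem.List.enumerate nis.2 1).map
            (fun ki => (ki.2, nis.1 ++ "_" ++ PySem.Int.toStr ki.1))) := by
      rw [items_buildPositions]
      rw [List.flatMap_map]
      refine List.mem_flatMap.2 ⟨name, (PySem.Set.mem_ofList _ _).2 (List.getElem_mem hj), ?_⟩
      refine List.mem_map.2 ⟨(1 + (r : Int), (j : Int)), ?_, rfl⟩
      have henum := PySem.List.getElem_enumerate (posOf people 0 name) 1 (k := r) (by simpa using hr)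
      rw [hval] at henum
      rw [← henum]
      exact List.getElem_mem _
    rw [writeAll_getElem?_of_mem _ _ j _ ?hpos (by rw [writes_fst]; exact writes_fst_nodup people) hpair (by simp [hj])]
    case hpos =>
      intro w hw
      have hwf : w.1 ∈ (PySem.Set.ofList people).flatMap (fun name => posOf people 0 name) := by
        rw [← writes_fst]
        exact List.mem_map_of_mem hw
      rcases List.mem_flatMap.1 hwf with ⟨nm, _, hx⟩
      rcases mem_posOf.1 hx with ⟨k, hk, hkeq, _⟩
      omega
    have h2 : (tagsFrom [] people)[j]? = some (name ++ "_" ++ PySem.Int.toStr ((r : Int) + 1)) := by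
      rw [List.getElem?_eq_getElem (by rw [tagsFrom_length]; exact hj)]
      rw [tagsFrom_getElem people [] j hj]
      simp [hname, hrdef]
    rw [h2, Int.add_comm]
  · rw [List.getElem?_eq_none (by rw [length_writeAll]; simpa using Nat.le_of_not_lt hj),
        List.getElem?_eq_none (by rw [tagsFrom_length]; exact Nat.le_of_not_lt hj)]


-- ===== VERDICT (by name: the statement is the Claim_ definition above) =====
theorem handle_dup_spec : Claim_equal_handle_dup := by
  intro people _
  unfold Spec_handle_dup handle_dup_alt
  rw [handle_dup_eq_tags, scatterTags_eq_tagsFrom]
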